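-- pv_equiv track=rewrite | github.com/hansweytjens/neurosymbolic_test | check_declare_violations.py | check_altresponse
-- ===== SOURCE A (Python) =====
-- def check_altresponse(seq, A, B, **_):
--     pending = False
--     for act in seq:
--         if act == A:
--             if pending:
--                 return True
--             pending = True
--         elif act == B and pending:
--             pending = False
--     return False
-- ===== SOURCE B (Python) =====
-- def check_altresponse(seq, A, B, **_):
--     # filter relevant tokens, record A-markers (A tested first, matching A's branch precedence)
--     flags = [act == A for act in seq if act == A or act == B]
--     return any(x and y for x, y in zip(flags, flags[1:]))
-- ===== Notes on version B (the rewrite author's own statement) =====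
-- stated objective: alternative
-- what changed: Replaces the stateful pending-flag loop with a two-phase decomposition: project the sequence to a boolean list of A-markers among relevant (A or B) tokens, then scan for an adjacent pair of A-markers via zip.
import Mathlib
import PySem

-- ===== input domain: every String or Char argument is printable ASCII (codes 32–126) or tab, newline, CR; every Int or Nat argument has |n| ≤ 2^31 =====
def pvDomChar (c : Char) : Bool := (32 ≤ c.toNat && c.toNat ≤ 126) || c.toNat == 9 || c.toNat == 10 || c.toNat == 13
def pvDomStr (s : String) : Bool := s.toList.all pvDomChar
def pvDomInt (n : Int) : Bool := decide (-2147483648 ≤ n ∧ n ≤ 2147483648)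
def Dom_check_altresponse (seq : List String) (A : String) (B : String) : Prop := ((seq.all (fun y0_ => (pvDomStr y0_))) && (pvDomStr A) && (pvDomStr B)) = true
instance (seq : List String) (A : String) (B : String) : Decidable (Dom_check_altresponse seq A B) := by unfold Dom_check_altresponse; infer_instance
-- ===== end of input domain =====

-- B replaces A's stateful pending-flag loop by a filter-to-A-markers projection plus an
-- adjacent-pair scan; objective: alternative decomposition, same O(n) cost.

-- ===== PORT A =====
-- loop over seq with the 'pending' flag; 'return True' modelled by short-circuiting recursion
def check_altresponse_loop (seq : List String) (A : String) (B : String) (pending : Bool) : Bool :=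
  match seq with
  | [] => false
  | act :: rest =>
    if act == A then
      if pending then true
      else check_altresponse_loop rest A B true
    else if act == B && pending then
      check_altresponse_loop rest A B false
    else
      check_altresponse_loop rest A B pending

def check_altresponse (seq : List String) (A : String) (B : String) : Bool :=
  check_altresponse_loop seq A B false

-- ===== PORT B =====
def check_altresponse_alt (seq : List String) (A : String) (B : String) : Bool :=
  let flags := (seq.filter (fun act => act == A || act == B)).map (fun act => act == A)
  (flags.zip (flags.drop 1)).any (fun p => p.1 && p.2)

-- ===== PRECONDITION & SPEC =====
def Spec_check_altresponse (seq : List String) (A : String) (B : String) (out : Bool) : Prop := out = check_altresponse_alt seq A B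
instance (seq : List String) (A : String) (B : String) (out : Bool) : Decidable (Spec_check_altresponse seq A B out) := by unfold Spec_check_altresponse; infer_instance

-- ===== CLAIM (what is proved, stated in full; the proofs are below) =====
def Claim_equal_check_altresponse : Prop := ∀ (seq : List String) (A : String) (B : String), Dom_check_altresponse seq A B → Spec_check_altresponse seq A B (check_altresponse seq A B)

-- ===== LEMMAS AND PROOFS =====

-- adjacency scan on a boolean list, written as structural recursion (proof-side helper)
def pvAdj : List Bool → Bool
  | [] => false
  | [_] => false
  | x :: y :: rest => (x && y) || pvAdj (y :: rest)

theorem pvAdj_eq_zipAny (l : List Bool) :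
    (l.zip (l.drop 1)).any (fun p => p.1 && p.2) = pvAdj l := by
  induction l with
  | nil => rfl
  | cons x rest ih =>
    cases rest with
    | nil => rfl
    | cons y rest' =>
      simp only [List.drop, List.zip_cons_cons, List.any_cons, pvAdj]
      rw [← ih]
      rfl

theorem pvAdj_false_cons (l : List Bool) : pvAdj (false :: l) = pvAdj l := by
  cases l <;> simp [pvAdj]

-- loop invariant: A's loop from state 'pending' equals the adjacency scan of the
-- flag list with the pending state prepended
theorem loop_eq_adj (seq : List String) (A B : String) (pending : Bool) :
    check_altresponse_loop seq A B pending =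
      pvAdj ((if pending then [true] else []) ++
        (seq.filter (fun act => act == A || act == B)).map (fun act => act == A)) := by
  induction seq generalizing pending with
  | nil => cases pending <;> simp [check_altresponse_loop, pvAdj]
  | cons act rest ih =>
    simp only [check_altresponse_loop, List.filter_cons]
    by_cases hA : act == A
    · cases pending with
      | true => simp [hA, pvAdj]
      | false => simp [hA, ih true]
    · by_cases hB : act == B
      · cases pending with
        | true =>
          simp [hA, hB, ih false, pvAdj, pvAdj_false_cons]
        | false =>
          simp [hA, hB, ih false, pvAdj_false_cons]
      · simp [hA, hB, ih pending]

-- ===== VERDICT (by name: the statement is the Claim_ definition above) =====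
theorem check_altresponse_spec : Claim_equal_check_altresponse := by
  intro seq A B _
  unfold Spec_check_altresponse check_altresponse check_altresponse_alt
  rw [loop_eq_adj, pvAdj_eq_zipAny]
  rfl
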